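-- pv_equiv track=rewrite | github.com/AdamZhouSE/pythonHomework | Code/CodeRecords/2656/48102/261236.py | right_diff
-- ===== SOURCE A (Python) =====
-- def right_diff(num1: int, num2: int) -> int:
--     if num1 == num2:
--         return -1
--     else:
--         charge = 0x1
--         index = 0
--         while index < 32:
--             if num1 & charge != num2 & charge:
--                 return index + 1
--             index += 1
--             num1 >>= 1
--             num2 >>= 1
--         return -1
-- ===== SOURCE B (Python) =====
-- def right_diff(num1: int, num2: int) -> int:
--     x = num1 ^ num2
--     if x == 0:
--         return -1
--     t = (x & -x).bit_length() - 1
--     return t + 1 if t < 32 else -1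
-- ===== Notes on version B (the rewrite author's own statement) =====
-- stated objective: idiomatic
-- what changed: Replaces the 32-iteration per-bit scan with a single XOR plus lowest-set-bit isolation (x & -x) and bit_length, keeping the 1-based answer and the 32-bit window.
import Mathlib
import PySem

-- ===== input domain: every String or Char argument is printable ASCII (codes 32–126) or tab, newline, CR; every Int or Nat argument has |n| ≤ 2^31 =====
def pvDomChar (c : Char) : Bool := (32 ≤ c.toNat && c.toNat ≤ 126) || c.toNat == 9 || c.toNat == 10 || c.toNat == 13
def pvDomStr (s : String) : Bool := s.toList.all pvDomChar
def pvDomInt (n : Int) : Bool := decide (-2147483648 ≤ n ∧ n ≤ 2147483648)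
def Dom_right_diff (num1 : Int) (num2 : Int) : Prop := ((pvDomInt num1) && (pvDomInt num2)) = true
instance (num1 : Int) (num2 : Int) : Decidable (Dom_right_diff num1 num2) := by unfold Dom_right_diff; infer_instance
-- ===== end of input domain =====

-- B replaces A's 32-iteration per-bit scan by XOR + lowest-set-bit + bit_length (same values everywhere, including the 32-bit window).

-- ===== PORT A =====
-- the while loop: fuel = remaining iterations (32 - index), state (index, num1, num2)
def rdLoop (charge : Int) : Nat → Int → Int → Int → Int
  | 0, _, _, _ => -1
  | f+1, index, n1, n2 =>
    if PySem.Int.band n1 charge ≠ PySem.Int.band n2 charge then index + 1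
    else rdLoop charge f (index + 1) (n1 >>> (1 : Nat)) (n2 >>> (1 : Nat))

def right_diff (num1 : Int) (num2 : Int) : Int :=
  if num1 = num2 then -1
  else rdLoop 0x1 32 0 num1 num2

-- ===== PORT B =====
def right_diff_alt (num1 : Int) (num2 : Int) : Int :=
  let x := PySem.Int.bxor num1 num2
  if x = 0 then -1
  else
    let t : Int := (PySem.Int.bitLength (PySem.Int.band x (-x)) : Int) - 1
    if t < 32 then t + 1 else -1

-- ===== PRECONDITION & SPEC =====
def Spec_right_diff (num1 : Int) (num2 : Int) (out : Int) : Prop := out = right_diff_alt num1 num2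
instance (num1 : Int) (num2 : Int) (out : Int) : Decidable (Spec_right_diff num1 num2 out) := by unfold Spec_right_diff; infer_instance

-- ===== CLAIM (what is proved, stated in full; the proofs are below) =====
def Claim_equal_right_diff : Prop := ∀ (num1 : Int) (num2 : Int), Dom_right_diff num1 num2 → Spec_right_diff num1 num2 (right_diff num1 num2)

-- ===== LEMMAS AND PROOFS =====

-- proof-only helper: the isolated lowest set bit of a positive Nat, as A's loop sees it
def lowbit (n : Nat) : Nat := n - (n &&& (n - 1))

-- proof-only helper: B's 0-based first-difference position, as an Int
def tlow (x : Int) : Int := (PySem.Int.bitLength (PySem.Int.band x (-x)) : Int) - 1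

lemma lowbit_pos {n : Nat} (h : n ≠ 0) : 0 < lowbit n := by
  have := Nat.and_le_right (n := n) (m := n - 1)
  unfold lowbit; omega

lemma lowbit_odd {n : Nat} (h : n % 2 = 1) : lowbit n = 1 := by
  have key : n &&& (n - 1) = n - 1 := by
    apply Nat.eq_of_testBit_eq
    intro i
    cases i with
    | zero =>
      rw [Nat.testBit_and]
      simp [Nat.testBit_zero]
      omega
    | succ i =>
      rw [Nat.testBit_and, Nat.testBit_succ, Nat.testBit_succ]
      have : n / 2 = (n - 1) / 2 := by omega
      rw [this, Bool.and_self]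
  unfold lowbit; omega

lemma lowbit_even {n : Nat} (h : n % 2 = 0) : lowbit n = 2 * lowbit (n / 2) := by
  have key : n &&& (n - 1) = 2 * ((n / 2) &&& (n / 2 - 1)) := by
    apply Nat.eq_of_testBit_eq
    intro i
    cases i with
    | zero =>
      rw [Nat.testBit_and]
      simp [Nat.testBit_zero]
      omega
    | succ i =>
      rw [Nat.testBit_and, Nat.testBit_succ, Nat.testBit_succ, Nat.testBit_succ]
      have h1 : (n - 1) / 2 = n / 2 - 1 := by omega
      have h2 : 2 * (n / 2 &&& (n / 2 - 1)) / 2 = n / 2 &&& (n / 2 - 1) := by omega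
      rw [h1, h2, Nat.testBit_and]
  have hle : n / 2 &&& (n / 2 - 1) ≤ n / 2 - 1 := Nat.and_le_right
  unfold lowbit
  omega

lemma band_neg_self {x : Int} (hx : x ≠ 0) :
    PySem.Int.band x (-x) = (lowbit x.natAbs : Int) := by
  rcases lt_or_gt_of_ne hx with hneg | hpos
  · have ha : ¬ (0 ≤ x) := by omega
    have hb : 0 ≤ -x := by omega
    simp only [PySem.Int.band, if_neg ha, if_pos hb]
    have h1 : (-x).toNat = x.natAbs := by omega
    have h2 : (-x - 1).toNat = x.natAbs - 1 := by omega
    rw [h1, h2]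
    unfold lowbit
    omega
  · have ha : 0 ≤ x := by omega
    have hb : ¬ (0 ≤ -x) := by omega
    simp only [PySem.Int.band, if_pos ha, if_neg hb]
    have h1 : x.toNat = x.natAbs := by omega
    have h2 : (-(-x) - 1).toNat = x.natAbs - 1 := by omega
    rw [h1, h2]
    unfold lowbit
    omega

lemma bxor_eq_zero_iff (a b : Int) : PySem.Int.bxor a b = 0 ↔ a = b := by
  simp only [PySem.Int.bxor]
  split_ifs with ha hb hb
  · constructor
    · intro hh
      have h0 : a.toNat ^^^ b.toNat = 0 := by exact_mod_cast hh
      have := Nat.xor_eq_zero_iff.mp h0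
      omega
    · intro hh
      subst hh
      simp [Nat.xor_self]
  · generalize a.toNat ^^^ (-b - 1).toNat = M
    constructor <;> intro hh <;> omega
  · generalize (-a - 1).toNat ^^^ b.toNat = M
    constructor <;> intro hh <;> omega
  · constructor
    · intro hh
      have h0 : (-a - 1).toNat ^^^ (-b - 1).toNat = 0 := by exact_mod_cast hh
      have := Nat.xor_eq_zero_iff.mp h0
      omega
    · intro hh
      subst hh
      simp [Nat.xor_self]

lemma nat_xor_mod2 (m n : Nat) : (m ^^^ n) % 2 = if m % 2 = n % 2 then 0 else 1 := by
  rw [← Nat.and_one_is_mod, Nat.and_xor_distrib_right, Nat.and_one_is_mod, Nat.and_one_is_mod]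
  rcases Nat.mod_two_eq_zero_or_one m with h | h <;>
    rcases Nat.mod_two_eq_zero_or_one n with h' | h' <;> simp [h, h']

lemma mod2_bxor (a b : Int) :
    PySem.Int.mod (PySem.Int.bxor a b) 2 = 0 ↔ PySem.Int.mod a 2 = PySem.Int.mod b 2 := by
  rw [PySem.Int.mod_eq_emod_of_pos (by norm_num), PySem.Int.mod_eq_emod_of_pos (a := a) (by norm_num),
    PySem.Int.mod_eq_emod_of_pos (a := b) (by norm_num)]
  simp only [PySem.Int.bxor]
  split_ifs with ha hb hb
  · have h := nat_xor_mod2 a.toNat b.toNat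
    by_cases hp : a.toNat % 2 = b.toNat % 2
    · rw [if_pos hp] at h; generalize a.toNat ^^^ b.toNat = M at h ⊢; omega
    · rw [if_neg hp] at h; generalize a.toNat ^^^ b.toNat = M at h ⊢; omega
  · have h := nat_xor_mod2 a.toNat (-b - 1).toNat
    by_cases hp : a.toNat % 2 = (-b - 1).toNat % 2
    · rw [if_pos hp] at h; generalize a.toNat ^^^ (-b - 1).toNat = M at h ⊢; omega
    · rw [if_neg hp] at h; generalize a.toNat ^^^ (-b - 1).toNat = M at h ⊢; omega
  · have h := nat_xor_mod2 (-a - 1).toNat b.toNat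
    by_cases hp : (-a - 1).toNat % 2 = b.toNat % 2
    · rw [if_pos hp] at h; generalize (-a - 1).toNat ^^^ b.toNat = M at h ⊢; omega
    · rw [if_neg hp] at h; generalize (-a - 1).toNat ^^^ b.toNat = M at h ⊢; omega
  · have h := nat_xor_mod2 (-a - 1).toNat (-b - 1).toNat
    by_cases hp : (-a - 1).toNat % 2 = (-b - 1).toNat % 2
    · rw [if_pos hp] at h; generalize (-a - 1).toNat ^^^ (-b - 1).toNat = M at h ⊢; omega
    · rw [if_neg hp] at h; generalize (-a - 1).toNat ^^^ (-b - 1).toNat = M at h ⊢; omega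

lemma shiftRight_one (a : Int) : a >>> (1 : Nat) = PySem.Int.floordiv a 2 := by
  rw [Int.shiftRight_eq_div_pow, PySem.Int.floordiv_eq_ediv_of_pos (by norm_num)]
  norm_num

lemma floordiv2_bxor (a b : Int) :
    PySem.Int.floordiv (PySem.Int.bxor a b) 2 =
      PySem.Int.bxor (PySem.Int.floordiv a 2) (PySem.Int.floordiv b 2) := by
  rw [PySem.Int.floordiv_eq_ediv_of_pos (by norm_num),
    PySem.Int.floordiv_eq_ediv_of_pos (a := a) (by norm_num),
    PySem.Int.floordiv_eq_ediv_of_pos (a := b) (by norm_num)]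
  simp only [PySem.Int.bxor]
  split_ifs
  all_goals try omega
  · rw [show (a / 2).toNat = a.toNat / 2 by omega, show (b / 2).toNat = b.toNat / 2 by omega,
      ← Nat.xor_div_two]
    generalize a.toNat ^^^ b.toNat = M
    omega
  · rw [show (a / 2).toNat = a.toNat / 2 by omega,
      show (-(b / 2) - 1).toNat = (-b - 1).toNat / 2 by omega, ← Nat.xor_div_two]
    generalize a.toNat ^^^ (-b - 1).toNat = M
    omega
  · rw [show (-(a / 2) - 1).toNat = (-a - 1).toNat / 2 by omega,
      show (b / 2).toNat = b.toNat / 2 by omega, ← Nat.xor_div_two]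
    generalize (-a - 1).toNat ^^^ b.toNat = M
    omega
  · rw [show (-(a / 2) - 1).toNat = (-a - 1).toNat / 2 by omega,
      show (-(b / 2) - 1).toNat = (-b - 1).toNat / 2 by omega, ← Nat.xor_div_two]
    generalize (-a - 1).toNat ^^^ (-b - 1).toNat = M
    omega
lemma tlow_nonneg {x : Int} (hx : x ≠ 0) : 0 ≤ tlow x := by
  unfold tlow
  rw [band_neg_self hx]
  have hpos : 0 < lowbit x.natAbs := lowbit_pos (by omega)
  have := PySem.Int.bitLength_natCast hpos
  omega

lemma tlow_odd {x : Int} (hx : PySem.Int.mod x 2 ≠ 0) : tlow x = 0 := by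
  rw [PySem.Int.mod_eq_emod_of_pos (by norm_num)] at hx
  have hx0 : x ≠ 0 := by omega
  have hodd : x.natAbs % 2 = 1 := by omega
  unfold tlow
  rw [band_neg_self hx0, lowbit_odd hodd]
  decide

lemma tlow_even {x : Int} (hx0 : x ≠ 0) (hx : PySem.Int.mod x 2 = 0) :
    tlow x = tlow (PySem.Int.floordiv x 2) + 1 := by
  rw [PySem.Int.mod_eq_emod_of_pos (by norm_num)] at hx
  rw [PySem.Int.floordiv_eq_ediv_of_pos (by norm_num)]
  have hx2 : x / 2 ≠ 0 := by omega
  have habs : (x / 2).natAbs = x.natAbs / 2 := by omega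
  have heven : x.natAbs % 2 = 0 := by omega
  unfold tlow
  rw [band_neg_self hx0, band_neg_self hx2, habs,
    lowbit_even heven]
  have hpos : 0 < lowbit (x.natAbs / 2) := lowbit_pos (by omega)
  have h2 : 0 < 2 * lowbit (x.natAbs / 2) := by omega
  have hstep := PySem.Int.bitLength_natCast h2
  have hdiv : 2 * lowbit (x.natAbs / 2) / 2 = lowbit (x.natAbs / 2) := by omega
  rw [hdiv] at hstep
  omega

lemma loop_eq (f : Nat) : ∀ (idx a b : Int), PySem.Int.bxor a b ≠ 0 →
    rdLoop 1 f idx a b =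
      (if tlow (PySem.Int.bxor a b) < (f : Int)
       then idx + tlow (PySem.Int.bxor a b) + 1 else -1) := by
  induction f with
  | zero =>
    intro idx a b hx
    rw [rdLoop, if_neg]
    have := tlow_nonneg hx
    omega
  | succ f ih =>
    intro idx a b hx
    rw [rdLoop, PySem.Int.band_one, PySem.Int.band_one]
    by_cases hc : PySem.Int.mod a 2 = PySem.Int.mod b 2
    · rw [if_neg (not_not_intro hc)]
      rw [shiftRight_one, shiftRight_one]
      have heven : PySem.Int.mod (PySem.Int.bxor a b) 2 = 0 := (mod2_bxor a b).mpr hc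
      have hx' : PySem.Int.bxor (PySem.Int.floordiv a 2) (PySem.Int.floordiv b 2) ≠ 0 := by
        rw [← floordiv2_bxor]
        have h := PySem.Int.floordiv_mul_add_mod (PySem.Int.bxor a b) 2
        intro h0
        rw [h0] at h
        omega
      rw [ih (idx + 1) _ _ hx']
      rw [← floordiv2_bxor] at hx' ⊢
      have hstep := tlow_even hx heven
      rw [hstep]
      split_ifs with h1 h2 h2 <;> push_cast at h1 h2 ⊢ <;> omega
    · rw [if_pos hc]
      have hodd : PySem.Int.mod (PySem.Int.bxor a b) 2 ≠ 0 := by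
        intro h; exact hc ((mod2_bxor a b).mp h)
      rw [tlow_odd hodd, if_pos (by push_cast; omega)]
      omega

-- ===== VERDICT (by name: the statement is the Claim_ definition above) =====
theorem right_diff_spec : Claim_equal_right_diff := by
  intro num1 num2 _
  unfold Spec_right_diff right_diff right_diff_alt
  by_cases h : num1 = num2
  · rw [if_pos h]
    simp [h, PySem.Int.bxor_self]
  · rw [if_neg h]
    have hx : PySem.Int.bxor num1 num2 ≠ 0 := by
      rw [Ne, bxor_eq_zero_iff]; exact h
    rw [loop_eq 32 0 num1 num2 hx]
    simp only [if_neg hx]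
    have : tlow (PySem.Int.bxor num1 num2) =
        (PySem.Int.bitLength (PySem.Int.band (PySem.Int.bxor num1 num2)
          (-(PySem.Int.bxor num1 num2))) : Int) - 1 := rfl
    rw [← this]
    split_ifs with h1 h2 h2 <;> push_cast at h1 ⊢ <;> omega
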